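-- pv_equiv track=rewrite | github.com/flashpoint493/VibeCollab | src/vibecollab/cli/guide.py | _suggest_commit_message
-- ===== SOURCE A (Python) =====
-- from typing import Dict, List, Optional
--
-- def _suggest_commit_message(diff_files: List[str]) -> str:
--     """Suggest commit message prefix based on diff file list"""
--     has_src = any(f.startswith("src/") for f in diff_files)
--     has_test = any(f.startswith("tests/") for f in diff_files)
--     has_doc = any(
--         f.startswith("docs/") or f.endswith(".md") or f == "llms.txt"
--         for f in diff_files
--     )
--     has_config = any(
--         f in ("project.yaml", "pyproject.toml", ".gitignore")
--         for f in diff_files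
--     )
--     has_schema = any(f.startswith("schema/") for f in diff_files)
--
--     if has_src and has_test:
--         return "feat:"
--     elif has_test and not has_src:
--         return "test:"
--     elif has_doc and not has_src:
--         return "docs:"
--     elif has_config and not has_src:
--         return "chore:"
--     elif has_schema:
--         return "design:"
--     elif has_src:
--         return "feat:"
--     return "chore:"
-- ===== SOURCE B (Python) =====
-- from typing import Dict, List, Optional
--
-- _SRC, _TEST, _DOC, _CONFIG, _SCHEMA = 1, 2, 4, 8, 16
--
-- def _classify(f: str) -> int:
--     """Bitmask of the categories a single file belongs to."""
--     m = 0
--     if f.startswith("src/"):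
--         m |= _SRC
--     if f.startswith("tests/"):
--         m |= _TEST
--     if f.startswith("docs/") or f.endswith(".md") or f == "llms.txt":
--         m |= _DOC
--     if f in ("project.yaml", "pyproject.toml", ".gitignore"):
--         m |= _CONFIG
--     if f.startswith("schema/"):
--         m |= _SCHEMA
--     return m
--
-- def _suggest_commit_message(diff_files: List[str]) -> str:
--     """Suggest commit message prefix based on diff file list"""
--     m = 0
--     for f in diff_files:
--         m |= _classify(f)
--     if m & _SRC:
--         # with src changes, only a schema-without-test change is not a feat
--         if not (m & _TEST) and (m & _SCHEMA):
--             return "design:"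
--         return "feat:"
--     if m & _TEST:
--         return "test:"
--     if m & _DOC:
--         return "docs:"
--     if m & _CONFIG:
--         return "chore:"
--     if m & _SCHEMA:
--         return "design:"
--     return "chore:"
-- ===== Notes on version B (the rewrite author's own statement) =====
-- stated objective: alternative
-- what changed: B classifies each file once into an integer bitmask of categories, ORs the masks in a single pass, and decides with a restructured nested decision tree that branches on the src bit first, instead of A's five any() scans feeding a flat if/elif ladder.
import Mathlib
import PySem

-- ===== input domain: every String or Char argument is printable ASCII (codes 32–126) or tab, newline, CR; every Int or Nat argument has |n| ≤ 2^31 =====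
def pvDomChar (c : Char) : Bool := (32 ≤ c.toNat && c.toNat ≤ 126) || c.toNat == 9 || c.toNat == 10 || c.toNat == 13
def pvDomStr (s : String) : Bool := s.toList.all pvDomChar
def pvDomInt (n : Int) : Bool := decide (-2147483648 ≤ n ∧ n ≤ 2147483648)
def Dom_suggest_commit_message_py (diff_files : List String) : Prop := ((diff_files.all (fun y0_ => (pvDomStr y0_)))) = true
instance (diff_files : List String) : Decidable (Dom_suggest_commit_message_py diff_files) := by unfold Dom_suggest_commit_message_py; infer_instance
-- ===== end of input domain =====

-- B classifies each file into a bitmask, ORs masks in one pass, and decides via a src-first nested tree (alternative decomposition; same results).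


-- ===== PORT A =====
def pA_src (f : String) : Bool := PySem.Str.startswith f "src/"
def pA_test (f : String) : Bool := PySem.Str.startswith f "tests/"
def pA_doc (f : String) : Bool := PySem.Str.startswith f "docs/" || PySem.Str.endswith f ".md" || f == "llms.txt"
def pA_config (f : String) : Bool := f == "project.yaml" || f == "pyproject.toml" || f == ".gitignore"
def pA_schema (f : String) : Bool := PySem.Str.startswith f "schema/"

def suggest_commit_message_py (diff_files : List String) : String :=
  let has_src := diff_files.any pA_src
  let has_test := diff_files.any pA_test
  let has_doc := diff_files.any pA_doc
  let has_config := diff_files.any pA_config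
  let has_schema := diff_files.any pA_schema
  if has_src && has_test then "feat:"
  else if has_test && !has_src then "test:"
  else if has_doc && !has_src then "docs:"
  else if has_config && !has_src then "chore:"
  else if has_schema then "design:"
  else if has_src then "feat:"
  else "chore:"

-- ===== PORT B =====
-- _classify: bitmask of the categories a single file belongs to (SRC=1, TEST=2, DOC=4, CONFIG=8, SCHEMA=16)
def pvClassify (f : String) : Nat :=
  let m : Nat := 0
  let m := if PySem.Str.startswith f "src/" then m ||| 1 else m
  let m := if PySem.Str.startswith f "tests/" then m ||| 2 else m
  let m := if PySem.Str.startswith f "docs/" || PySem.Str.endswith f ".md" || f == "llms.txt" then m ||| 4 else m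
  let m := if f == "project.yaml" || f == "pyproject.toml" || f == ".gitignore" then m ||| 8 else m
  let m := if PySem.Str.startswith f "schema/" then m ||| 16 else m
  m

def suggest_commit_message_py_alt (diff_files : List String) : String :=
  let m := diff_files.foldl (fun m f => m ||| pvClassify f) 0
  if m &&& 1 ≠ 0 then
    -- with src changes, only a schema-without-test change is not a feat
    if m &&& 2 = 0 ∧ m &&& 16 ≠ 0 then "design:" else "feat:"
  else if m &&& 2 ≠ 0 then "test:"
  else if m &&& 4 ≠ 0 then "docs:"
  else if m &&& 8 ≠ 0 then "chore:"
  else if m &&& 16 ≠ 0 then "design:"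
  else "chore:"

-- ===== PRECONDITION & SPEC =====
def Spec_suggest_commit_message_py (diff_files : List String) (out : String) : Prop := out = suggest_commit_message_py_alt diff_files
instance (diff_files : List String) (out : String) : Decidable (Spec_suggest_commit_message_py diff_files out) := by unfold Spec_suggest_commit_message_py; infer_instance

-- ===== CLAIM =====
def Claim_equal_suggest_commit_message_py : Prop := ∀ (diff_files : List String), Dom_suggest_commit_message_py diff_files → Spec_suggest_commit_message_py diff_files (suggest_commit_message_py diff_files)

-- ===== LEMMAS AND PROOFS =====
lemma classify_bits (f : String) :
    (pvClassify f).testBit 0 = pA_src f ∧ (pvClassify f).testBit 1 = pA_test f ∧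
    (pvClassify f).testBit 2 = pA_doc f ∧ (pvClassify f).testBit 3 = pA_config f ∧
    (pvClassify f).testBit 4 = pA_schema f := by
  cases h1 : pA_src f <;> cases h2 : pA_test f <;> cases h3 : pA_doc f <;>
    cases h4 : pA_config f <;> cases h5 : pA_schema f <;>
    simp_all [pvClassify, pA_src, pA_test, pA_doc, pA_config, pA_schema] <;> decide

lemma fold_testBit (l : List String) (m0 : Nat) (i : Nat) :
    (l.foldl (fun m f => m ||| pvClassify f) m0).testBit i
      = (m0.testBit i || l.any (fun f => (pvClassify f).testBit i)) := by
  induction l generalizing m0 with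
  | nil => simp
  | cons x xs ih => simp [List.foldl_cons, ih, Bool.or_assoc]

lemma and_pow_ne (m i : Nat) : (m &&& 2 ^ i ≠ 0) ↔ m.testBit i = true := by
  rw [Nat.and_two_pow]
  cases h : m.testBit i <;> simp

-- ===== VERDICT =====
set_option maxHeartbeats 1000000 in
theorem suggest_commit_message_py_spec : Claim_equal_suggest_commit_message_py := by
  intro l _
  unfold Spec_suggest_commit_message_py suggest_commit_message_py suggest_commit_message_py_alt
  have e : ∀ i : Nat,
      ((l.foldl (fun m f => m ||| pvClassify f) 0) &&& 2 ^ i ≠ 0)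
        ↔ l.any (fun f => (pvClassify f).testBit i) = true := by
    intro i; rw [and_pow_ne, fold_testBit]; simp
  have e0 := e 0; have e1 := e 1; have e2 := e 2; have e3 := e 3; have e4 := e 4
  simp only [show (2:Nat)^0 = 1 from rfl, show (2:Nat)^1 = 2 from rfl,
    show (2:Nat)^2 = 4 from rfl, show (2:Nat)^3 = 8 from rfl,
    show (2:Nat)^4 = 16 from rfl] at e0 e1 e2 e3 e4
  simp only [fun f => (classify_bits f).1] at e0
  simp only [fun f => (classify_bits f).2.1] at e1
  simp only [fun f => (classify_bits f).2.2.1] at e2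
  simp only [fun f => (classify_bits f).2.2.2.1] at e3
  simp only [fun f => (classify_bits f).2.2.2.2] at e4
  have e1' : ((l.foldl (fun m f => m ||| pvClassify f) 0) &&& 2 = 0)
      ↔ ¬ (l.any pA_test = true) := by rw [← e1]; tauto
  simp only [e0, e1, e1', e2, e3, e4]
  cases h1 : l.any pA_src <;> cases h2 : l.any pA_test <;> cases h3 : l.any pA_doc <;>
    cases h4 : l.any pA_config <;> cases h5 : l.any pA_schema <;> simp_all
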